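-- pv_equiv track=rewrite | github.com/saintsim/adventofcode | src/year2021/day08/part1.py | solve_segments
-- ===== SOURCE A (Python) =====
-- def parse(input):
--     inputs = []
--     outputs = []
--     for line in input:
--         line_inputs, line_outputs = line.split(" | ")
--         inputs.append((line_inputs.split()))
--         outputs.append((line_outputs.split()))
--     return [inputs, outputs]
--
-- def solve_segments(input):
--     signals = parse(input)
--     count = 0
--     for outputs in signals[1]:
--         for output in outputs:
--             if len(output) == 2 or len(output) == 3 or len(output) == 4 or len(output) == 7:
--                 count += 1
--     return count
-- ===== SOURCE B (Python) =====
-- def solve_segments(input):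
--     # Character-level state machine: find the separator, then scan the right-hand
--     # side once, tracking the length of the current run of non-space characters;
--     # a run ends at whitespace (a sentinel space flushes the last run).
--     count = 0
--     for line in input:
--         right = line[line.index(" | ") + 3:]
--         run = 0
--         for ch in right + " ":
--             if ch.isspace():
--                 if run == 2 or run == 3 or run == 4 or run == 7:
--                     count += 1
--                 run = 0
--             else:
--                 run += 1
--     return count
-- ===== Notes on version B (the rewrite author's own statement) =====
-- stated objective: alternative
-- what changed: B never splits anything: it locates the separator with str.index and then counts segment words by a single character-level scan of the right-hand side, tracking run lengths of non-whitespace characters, instead of A's parse step that builds word lists with split and filters them by length.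
import Mathlib
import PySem

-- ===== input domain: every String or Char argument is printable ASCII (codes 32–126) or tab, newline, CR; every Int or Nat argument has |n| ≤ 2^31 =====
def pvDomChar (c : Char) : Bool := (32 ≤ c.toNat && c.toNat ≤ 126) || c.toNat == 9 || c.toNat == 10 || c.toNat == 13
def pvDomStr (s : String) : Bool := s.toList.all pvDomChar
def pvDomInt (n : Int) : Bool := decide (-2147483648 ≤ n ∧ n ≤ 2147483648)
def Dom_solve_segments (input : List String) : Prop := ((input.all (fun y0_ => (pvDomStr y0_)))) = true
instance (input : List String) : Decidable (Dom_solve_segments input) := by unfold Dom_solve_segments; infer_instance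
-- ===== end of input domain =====

-- B replaces A's split-based parse-then-filter with a character-level state machine:
-- it locates the separator with index/find and counts words by scanning run lengths
-- of non-whitespace characters in one pass, never building any word list.

-- ===== PORT A =====
-- line.split(" | "): the separator is nonempty, so split? is always some
def pvSplitSep (line : String) : List String := (PySem.Str.split? line " | ").getD []

-- parse: builds the pair (inputs, outputs); the two-name unpacking raises ValueError
-- unless the split has exactly two parts (such inputs are excluded by Pre_; the
-- `_ => acc` branch is unreachable under Pre_).
def pvParse (input : List String) : List (List String) × List (List String) :=
  input.foldl
    (fun acc line =>
      match pvSplitSep line with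
      | [line_inputs, line_outputs] =>
          (acc.1 ++ [PySem.Str.split₀ line_inputs], acc.2 ++ [PySem.Str.split₀ line_outputs])
      | _ => acc)
    ([], [])

def solve_segments (input : List String) : Int :=
  (pvParse input).2.foldl
    (fun count outputs =>
      outputs.foldl
        (fun count output =>
          if PySem.Str.len output = 2 ∨ PySem.Str.len output = 3 ∨
             PySem.Str.len output = 4 ∨ PySem.Str.len output = 7 then
            count + 1
          else count)
        count)
    0

-- ===== PORT B =====
-- line.index(" | ") raises ValueError when the separator is absent (those inputs are
-- outside Pre_); on the inputs where it returns a value it equals PySem.Str.find,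
-- which is exact here. The inner loop is Source B's character scan over right + " "
-- carrying the (count, run) state.
def solve_segments_alt (input : List String) : Int :=
  input.foldl
    (fun count line =>
      let right := PySem.Str.slice line (some (PySem.Str.find line " | " + 3)) none
      ((right.toList ++ [' ']).foldl
        (fun st ch =>
          if PySem.Chars.isspace ch then
            (if st.2 = 2 ∨ st.2 = 3 ∨ st.2 = 4 ∨ st.2 = 7 then st.1 + 1 else st.1, 0)
          else (st.1, st.2 + 1))
        (count, (0 : Int))).1)
    0

-- ===== PRECONDITION & SPEC =====
-- Pre_ excludes exactly the lines on which A's two-name unpacking of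
-- line.split(" | ") raises ValueError: every line must contain the separator
-- " | " exactly once (len(line.split(sep)) == line.count(sep) + 1).
def Pre_solve_segments (input : List String) : Prop :=
  ∀ line ∈ input, PySem.Str.count line " | " = 1
instance (input : List String) : Decidable (Pre_solve_segments input) := by
  unfold Pre_solve_segments; infer_instance

def pvWitness_solve_segments : List String :=
  ["ab cde | ab cdef abcd", "xx yy | abcdefg z"]

def Spec_solve_segments (input : List String) (out : Int) : Prop := out = solve_segments_alt input
instance (input : List String) (out : Int) : Decidable (Spec_solve_segments input out) := by
  unfold Spec_solve_segments; infer_instance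

-- ===== CLAIM (what is proved, stated in full; the proofs are below) =====
def Claim_equal_solve_segments : Prop :=
  ∀ (input : List String), Dom_solve_segments input → Pre_solve_segments input →
    Spec_solve_segments input (solve_segments input)

-- ===== LEMMAS AND PROOFS =====

-- the separator " | " as a character list
def pvSep : List Char := [' ', '|', ' ']

-- words of the interesting lengths, counted as an Int
def pvCnt (ws : List (List Char)) : Int :=
  ((ws.filter fun w =>
      decide (w.length = 2 ∨ w.length = 3 ∨ w.length = 4 ∨ w.length = 7)).length : Int)

-- the part of the line after the (unique) separator, as both proofs see it
def pvSnd (line : String) : List Char :=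
  match PySem.Chars.splitOn line.toList pvSep with
  | [_, b] => b
  | _ => []

lemma cnt_cons (w : List Char) (ws : List (List Char)) :
    pvCnt (w :: ws) = (if w.length = 2 ∨ w.length = 3 ∨ w.length = 4 ∨ w.length = 7 then 1 else 0) + pvCnt ws := by
  simp only [pvCnt, List.filter_cons]
  by_cases h : w.length = 2 ∨ w.length = 3 ∨ w.length = 4 ∨ w.length = 7
  · rw [decide_eq_true h, if_pos rfl, if_pos h]
    simp only [List.length_cons]
    push_cast; ring
  · rw [decide_eq_false h, if_neg (by simp), if_neg h]
    simp

lemma int_len_iff (cur : List Char) :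
    ((cur.length : Int) = 2 ∨ (cur.length : Int) = 3 ∨ (cur.length : Int) = 4 ∨ (cur.length : Int) = 7)
      ↔ (cur.length = 2 ∨ cur.length = 3 ∨ cur.length = 4 ∨ cur.length = 7) := by
  omega

-- split₀.go pushes the accumulator through unchanged
lemma split0_go_acc (s : List Char) : ∀ (cur : List Char) (acc : List (List Char)),
    PySem.Chars.split₀.go s cur acc = acc.reverse ++ PySem.Chars.split₀.go s cur [] := by
  induction s with
  | nil =>
    intro cur acc
    simp [PySem.Chars.split₀.go]
    split_ifs <;> simp
  | cons c rest ih =>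
    intro cur acc
    simp only [PySem.Chars.split₀.go]
    split_ifs with h1 h2
    · exact ih [] acc
    · rw [ih [] (cur.reverse :: acc), ih [] [cur.reverse]]; simp
    · exact ih (c :: cur) acc

-- B's run-length scan of s ++ [' '] counts exactly the good-length words of split₀
lemma scan_counts (s : List Char) : ∀ (cur : List Char) (c : Int),
    ((s ++ [' ']).foldl
      (fun st ch =>
        if PySem.Chars.isspace ch then
          (if st.2 = 2 ∨ st.2 = 3 ∨ st.2 = 4 ∨ st.2 = 7 then st.1 + 1 else st.1, 0)
        else (st.1, st.2 + 1))
      (c, (cur.length : Int))).1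
      = c + pvCnt (PySem.Chars.split₀.go s cur []) := by
  induction s with
  | nil =>
    intro cur c
    have hsp : PySem.Chars.isspace ' ' = true := by decide
    simp only [List.nil_append, List.foldl_cons, List.foldl_nil, hsp, if_true]
    simp only [PySem.Chars.split₀.go]
    by_cases hc : cur = []
    · subst hc; simp [pvCnt]
    · have hemp : cur.isEmpty = false := by simpa [List.isEmpty_iff] using hc
      simp only [hemp, Bool.false_eq_true, if_false]
      by_cases h : cur.length = 2 ∨ cur.length = 3 ∨ cur.length = 4 ∨ cur.length = 7
      · rw [if_pos ((int_len_iff cur).mpr h)]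
        rw [List.reverse_singleton, cnt_cons]
        simp only [List.length_reverse, h, if_true, pvCnt]
        simp
      · rw [if_neg (fun hh => h ((int_len_iff cur).mp hh))]
        rw [List.reverse_singleton, cnt_cons]
        simp only [List.length_reverse, h, if_false, pvCnt]
        simp
  | cons ch rest ih =>
    intro cur c
    simp only [List.cons_append, List.foldl_cons]
    by_cases hs : PySem.Chars.isspace ch = true
    · simp only [hs, if_true]
      simp only [PySem.Chars.split₀.go, hs, if_true]
      by_cases hc : cur = []
      · subst hc
        simp only [List.isEmpty_nil, if_true]
        have h0 : ¬ ((0 : Int) = 2 ∨ (0 : Int) = 3 ∨ (0 : Int) = 4 ∨ (0 : Int) = 7) := by omega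
        simp only [List.length_nil, Nat.cast_zero, h0, if_false]
        exact ih [] c
      · have hemp : cur.isEmpty = false := by simpa [List.isEmpty_iff] using hc
        simp only [hemp, Bool.false_eq_true, if_false]
        rw [split0_go_acc rest [] [cur.reverse]]
        simp only [List.reverse_cons, List.reverse_nil, List.nil_append, List.singleton_append]
        rw [cnt_cons]
        simp only [List.length_reverse]
        by_cases h : cur.length = 2 ∨ cur.length = 3 ∨ cur.length = 4 ∨ cur.length = 7
        · rw [if_pos ((int_len_iff cur).mpr h)]
          have := ih [] (c + 1)
          simp only [List.length_nil, Nat.cast_zero] at this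
          rw [this]
          simp only [h, if_true]
          ring
        · rw [if_neg (fun hh => h ((int_len_iff cur).mp hh))]
          have := ih [] c
          simp only [List.length_nil, Nat.cast_zero] at this
          rw [this]
          simp only [h, if_false]
          ring
    · simp only [hs]
      simp only [PySem.Chars.split₀.go, hs, Bool.false_eq_true, if_false]
      have := ih (ch :: cur) c
      simp only [List.length_cons] at this
      rw [← this]
      norm_num

-- count.go is independent of the fuel once the fuel covers the list
lemma countgo_fuel (f1 : Nat) : ∀ (f2 : Nat) (l : List Char) (acc : Nat),
    l.length ≤ f1 → l.length ≤ f2 →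
    PySem.Chars.count.go pvSep f1 l acc = PySem.Chars.count.go pvSep f2 l acc := by
  induction f1 with
  | zero =>
    intro f2 l acc h1 _
    have : l = [] := by cases l <;> simp_all
    subst this
    cases f2 <;> simp [PySem.Chars.count.go]
  | succ f ih =>
    intro f2 l acc h1 h2
    cases l with
    | nil => cases f2 <;> simp [PySem.Chars.count.go]
    | cons c rest =>
      cases f2 with
      | zero => simp at h2
      | succ g =>
        simp only [PySem.Chars.count.go]
        split_ifs with hp
        · have hlen : pvSep.length ≤ (c :: rest).length :=
            (List.isPrefixOf_iff_prefix.mp hp).length_le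
          have hd : (List.drop pvSep.length (c :: rest)).length ≤ f := by
            simp only [List.length_drop, List.length_cons]
            simp only [pvSep, List.length_cons] at hlen ⊢
            simp at h1; omega
          exact ih g _ _ hd (by
            simp only [List.length_drop, List.length_cons]
            simp only [pvSep, List.length_cons] at hlen ⊢
            simp at h2; omega)
        · exact ih g _ _ (by simp at h1 ⊢; omega) (by simp at h2 ⊢; omega)

lemma countgo_acc (f : Nat) : ∀ (l : List Char) (acc : Nat),
    PySem.Chars.count.go pvSep f l acc = acc + PySem.Chars.count.go pvSep f l 0 := by
  induction f with
  | zero => intro l acc; simp [PySem.Chars.count.go]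
  | succ g ih =>
    intro l acc
    cases l with
    | nil => simp [PySem.Chars.count.go]
    | cons c rest =>
      simp only [PySem.Chars.count.go]
      split_ifs with hp
      · rw [ih _ (acc + 1), ih _ (0 + 1)]; omega
      · rw [ih rest acc]

-- one unfolding step of count at the top level
lemma count_cons (c : Char) (rest : List Char) :
    PySem.Chars.count (c :: rest) pvSep =
      (if pvSep.isPrefixOf (c :: rest) then 1 + PySem.Chars.count (rest.drop 2) pvSep
       else PySem.Chars.count rest pvSep) := by
  have hne : (pvSep.isEmpty = true) = False := by simp [pvSep]
  simp only [PySem.Chars.count, hne, if_false]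
  simp only [List.length_cons]
  simp only [PySem.Chars.count.go]
  split_ifs with hp
  · have h3 : List.drop pvSep.length (c :: rest) = rest.drop 2 := by
      simp [pvSep]
    rw [h3, countgo_acc]
    rw [countgo_fuel rest.length (rest.drop 2).length (rest.drop 2) 0
      (by simp) (le_refl _)]
  · rfl

lemma count_zero_not_infix' (n : Nat) : ∀ (l : List Char), l.length ≤ n →
    PySem.Chars.count l pvSep = 0 → ¬ pvSep <:+: l := by
  induction n with
  | zero =>
    intro l hl _ hinf
    have : l = [] := by cases l <;> simp_all
    subst this
    have := hinf.length_le; simp [pvSep] at this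
  | succ m ih =>
    intro l hl h hinf
    cases l with
    | nil => have := hinf.length_le; simp [pvSep] at this
    | cons c rest =>
      rw [count_cons] at h
      split_ifs at h with hp
      · omega
      · rcases List.infix_cons_iff.mp hinf with hpre | hinf'
        · exact hp (List.isPrefixOf_iff_prefix.mpr hpre)
        · exact ih rest (by simp at hl; omega) h hinf'

lemma count_zero_not_infix (l : List Char) (h : PySem.Chars.count l pvSep = 0) :
    ¬ pvSep <:+: l := count_zero_not_infix' l.length l (le_refl _) h

lemma count_one_dec' (n : Nat) : ∀ (l : List Char), l.length ≤ n →
    PySem.Chars.count l pvSep = 1 →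
    ∃ a b, l = a ++ pvSep ++ b ∧ (∀ i < a.length, ¬ pvSep <+: l.drop i) ∧
      ¬ pvSep <:+: b := by
  induction n with
  | zero =>
    intro l hl h
    have : l = [] := by cases l <;> simp_all
    subst this
    simp [PySem.Chars.count, pvSep, PySem.Chars.count.go] at h
  | succ m ih =>
    intro l hl h
    cases l with
    | nil => simp [PySem.Chars.count, pvSep, PySem.Chars.count.go] at h
    | cons c rest =>
      rw [count_cons] at h
      split_ifs at h with hp
      · -- separator at the front: a = [], b = rest.drop 2
        obtain ⟨t, ht⟩ := List.isPrefixOf_iff_prefix.mp hp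
        have hb : rest.drop 2 = t := by
          have := congrArg (List.drop 3) ht
          simpa [pvSep] using this.symm
        refine ⟨[], rest.drop 2, ?_, by simp, ?_⟩
        · simpa [hb] using ht.symm
        · exact count_zero_not_infix _ (by omega)
      · -- separator strictly inside rest
        obtain ⟨a', b, hdec, hno, hb⟩ := ih rest (by simp at hl; omega) h
        refine ⟨c :: a', b, by simp [hdec], ?_, hb⟩
        intro i hi
        cases i with
        | zero =>
          intro hpre
          exact hp (List.isPrefixOf_iff_prefix.mpr (by simpa using hpre))
        | succ j =>
          simp only [List.length_cons] at hi
          simpa using hno j (by omega)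

lemma count_one_dec (l : List Char) (h : PySem.Chars.count l pvSep = 1) :
    ∃ a b, l = a ++ pvSep ++ b ∧ (∀ i < a.length, ¬ pvSep <+: l.drop i) ∧
      ¬ pvSep <:+: b := count_one_dec' l.length l (le_refl _) h

lemma splitOngo_no_sep (fuel : Nat) : ∀ (l cur : List Char) (acc : List (List Char)),
    ¬ pvSep <:+: l →
    PySem.Chars.splitOn.go pvSep fuel l cur acc = ((cur.reverse ++ l) :: acc).reverse := by
  induction fuel with
  | zero => intro l cur acc _; simp [PySem.Chars.splitOn.go]
  | succ g ih =>
    intro l cur acc hinf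
    cases l with
    | nil => simp [PySem.Chars.splitOn.go]
    | cons c rest =>
      simp only [PySem.Chars.splitOn.go]
      split_ifs with hp
      · exact absurd ((List.isPrefixOf_iff_prefix.mp hp).isInfix) hinf
      · rw [ih rest (c :: cur) acc
          (fun h => hinf (List.infix_cons_iff.mpr (Or.inr h)))]
        simp

lemma splitOngo_dec (a : List Char) : ∀ (fuel : Nat) (cur : List Char)
    (acc : List (List Char)) (b : List Char),
    (a ++ pvSep ++ b).length < fuel →
    (∀ i < a.length, ¬ pvSep <+: (a ++ pvSep ++ b).drop i) → ¬ pvSep <:+: b →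
    PySem.Chars.splitOn.go pvSep fuel (a ++ pvSep ++ b) cur acc
      = acc.reverse ++ [cur.reverse ++ a, b] := by
  induction a with
  | nil =>
    intro fuel cur acc b hfuel _ hb
    cases fuel with
    | zero => simp at hfuel
    | succ g =>
      have hshape : ([] : List Char) ++ pvSep ++ b = ' ' :: ('|' :: ' ' :: b) := by simp [pvSep]
      rw [hshape]
      simp only [PySem.Chars.splitOn.go]
      have hp : pvSep.isPrefixOf (' ' :: ('|' :: ' ' :: b)) = true :=
        List.isPrefixOf_iff_prefix.mpr ⟨b, by simp [pvSep]⟩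
      rw [if_pos hp]
      have hdrop : List.drop pvSep.length (' ' :: ('|' :: ' ' :: b)) = b := by simp [pvSep]
      rw [hdrop, splitOngo_no_sep g b [] (cur.reverse :: acc) hb]
      simp
  | cons c a' ih =>
    intro fuel cur acc b hfuel hno hb
    cases fuel with
    | zero => simp at hfuel
    | succ g =>
      have hl : (c :: a') ++ pvSep ++ b = c :: (a' ++ pvSep ++ b) := by simp
      rw [hl]
      simp only [PySem.Chars.splitOn.go]
      have hp : ¬ pvSep.isPrefixOf (c :: (a' ++ pvSep ++ b)) = true := by
        intro hpp
        exact hno 0 (by simp) (by simpa [hl] using List.isPrefixOf_iff_prefix.mp hpp)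
      rw [if_neg hp]
      rw [ih g (c :: cur) acc b (by simp at hfuel ⊢; omega)
        (fun i hi => by simpa [hl] using hno (i + 1) (by simp; omega)) hb]
      simp

lemma splitOn_of_dec (a b : List Char)
    (hno : ∀ i < a.length, ¬ pvSep <+: (a ++ pvSep ++ b).drop i) (hb : ¬ pvSep <:+: b) :
    PySem.Chars.splitOn (a ++ pvSep ++ b) pvSep = [a, b] := by
  unfold PySem.Chars.splitOn
  rw [splitOngo_dec a ((a ++ pvSep ++ b).length + 1) [] [] b (by omega) hno hb]
  simp

lemma find_of_dec (a b : List Char)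
    (hno : ∀ i < a.length, ¬ pvSep <+: (a ++ pvSep ++ b).drop i) :
    PySem.Chars.find (a ++ pvSep ++ b) pvSep = (a.length : Int) := by
  set l := a ++ pvSep ++ b with hl
  have hinf : pvSep <:+: l := ⟨a, b, by simp [hl]⟩
  have hpos : 0 ≤ PySem.Chars.find l pvSep := (PySem.Chars.find_nonneg_iff l pvSep).mpr hinf
  have hspec := PySem.Chars.find_spec hpos
  have hat : pvSep <+: l.drop a.length := by
    rw [hl, List.append_assoc, List.drop_left]
    exact ⟨b, rfl⟩
  have h1 : ¬ a.length < (PySem.Chars.find l pvSep).toNat := fun hlt => hspec.2 a.length hlt hat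
  have h2 : ¬ (PySem.Chars.find l pvSep).toNat < a.length := fun hlt =>
    hno (PySem.Chars.find l pvSep).toNat hlt hspec.1
  have := Int.toNat_of_nonneg hpos
  omega

-- the per-line facts both assemblies need, from "exactly one separator"
lemma line_master (line : String) (h : PySem.Chars.count line.toList pvSep = 1) :
    (∃ s1 s2 : String, pvSplitSep line = [s1, s2] ∧ s2.toList = pvSnd line) ∧
    List.drop (PySem.Chars.find line.toList pvSep + 3).toNat line.toList = pvSnd line := by
  obtain ⟨a, b, hdec, hno, hb⟩ := count_one_dec line.toList h
  have hno' : ∀ i < a.length, ¬ pvSep <+: (a ++ pvSep ++ b).drop i := by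
    intro i hi; rw [← hdec]; exact hno i hi
  have hsplit : PySem.Chars.splitOn line.toList pvSep = [a, b] := by
    rw [hdec]; exact splitOn_of_dec a b hno' hb
  have hsnd : pvSnd line = b := by simp [pvSnd, hsplit]
  have hfind : PySem.Chars.find line.toList pvSep = (a.length : Int) := by
    rw [hdec]; exact find_of_dec a b hno'
  constructor
  · -- the string-level split has exactly the parts [a, b]
    have hmap := PySem.Str.split?_map line " | "
    have hsep : (" | " : String).toList = pvSep := by decide
    rw [hsep] at hmap
    rw [PySem.Chars.split?] at hmap
    rw [if_neg (by simp [pvSep]), hsplit] at hmap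
    cases hopt : PySem.Str.split? line " | " with
    | none => rw [hopt] at hmap; simp at hmap
    | some parts =>
      rw [hopt] at hmap
      simp only [Option.map_some, Option.some.injEq] at hmap
      match parts, hmap with
      | [s1, s2], hmap =>
        simp only [List.map_cons, List.map_nil, List.cons.injEq, and_true] at hmap
        exact ⟨s1, s2, by simp [pvSplitSep, hopt], by rw [hmap.2, hsnd]⟩
  · rw [hfind, hsnd, hdec]
    have : ((a.length : Int) + 3).toNat = (a ++ pvSep).length := by simp [pvSep]; omega
    rw [this, List.append_assoc, ← List.append_assoc, List.drop_left]

-- A's inner loop over one line's words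
lemma inner_count (outs : List String) : ∀ (c : Int),
    outs.foldl
      (fun count output =>
        if PySem.Str.len output = 2 ∨ PySem.Str.len output = 3 ∨
           PySem.Str.len output = 4 ∨ PySem.Str.len output = 7 then
          count + 1
        else count) c
      = c + pvCnt (outs.map String.toList) := by
  induction outs with
  | nil => intro c; simp [pvCnt]
  | cons o rest ih =>
    intro c
    rw [List.foldl_cons, ih, List.map_cons, cnt_cons]
    simp only [PySem.Str.len_eq]
    by_cases h : o.toList.length = 2 ∨ o.toList.length = 3 ∨ o.toList.length = 4 ∨ o.toList.length = 7
    · rw [if_pos ((int_len_iff o.toList).mpr h), if_pos h]; ring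
    · rw [if_neg (fun hh => h ((int_len_iff o.toList).mp hh)), if_neg h]; ring

-- A's parse builds exactly the per-line output word lists
lemma parse_snd (input : List String) : ∀ (ai ao : List (List String)),
    (∀ line ∈ input, ∃ s1 s2 : String, pvSplitSep line = [s1, s2] ∧ s2.toList = pvSnd line) →
    (input.foldl
      (fun acc line =>
        match pvSplitSep line with
        | [line_inputs, line_outputs] =>
            (acc.1 ++ [PySem.Str.split₀ line_inputs], acc.2 ++ [PySem.Str.split₀ line_outputs])
        | _ => acc)
      (ai, ao)).2
      = ao ++ input.map (fun line => (PySem.Chars.split₀ (pvSnd line)).map String.ofList) := by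
  induction input with
  | nil => intro ai ao _; simp
  | cons line rest ih =>
    intro ai ao h
    obtain ⟨s1, s2, hsplit, hs2⟩ := h line (List.mem_cons_self ..)
    simp only [List.foldl_cons, hsplit]
    rw [ih _ _ (fun l hl => h l (List.mem_cons_of_mem _ hl))]
    have : PySem.Str.split₀ s2 = (PySem.Chars.split₀ (pvSnd line)).map String.ofList := by
      simp [PySem.Str.split₀, hs2]
    rw [this]
    simp

-- ===== VERDICT (by name: the statement is the Claim_ definition above) =====
theorem solve_segments_spec : Claim_equal_solve_segments := by
  intro input _ hpre
  unfold Spec_solve_segments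
  have hsep : (" | " : String).toList = pvSep := by decide
  have hcnt : ∀ line ∈ input, PySem.Chars.count line.toList pvSep = 1 := by
    intro line hl
    have := hpre line hl
    rwa [PySem.Str.count_eq, hsep] at this
  -- A as a sum over lines
  unfold solve_segments pvParse
  rw [parse_snd input [] []
    (fun line hl => (line_master line (hcnt line hl)).1)]
  have hA : ∀ (L : List (List String)) (c : Int),
      L.foldl (fun count outputs =>
        outputs.foldl
          (fun count output =>
            if PySem.Str.len output = 2 ∨ PySem.Str.len output = 3 ∨
               PySem.Str.len output = 4 ∨ PySem.Str.len output = 7 then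
              count + 1
            else count) count) c
      = c + (L.map (fun outs => pvCnt (outs.map String.toList))).sum := by
    intro L c
    have : (fun (count : Int) (outputs : List String) =>
        outputs.foldl
          (fun count output =>
            if PySem.Str.len output = 2 ∨ PySem.Str.len output = 3 ∨
               PySem.Str.len output = 4 ∨ PySem.Str.len output = 7 then
              count + 1
            else count) count)
        = fun count outs => count + pvCnt (outs.map String.toList) := by
      funext c' outs; exact inner_count outs c'
    rw [this, PySem.List.foldl_add]
  rw [hA]
  -- B as the same sum over lines
  unfold solve_segments_alt
  rw [PySem.List.foldl_congr_mem input _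
    (fun count line => count + pvCnt (PySem.Chars.split₀ (pvSnd line))) 0
    (by
      intro count line hl
      obtain ⟨-, hdrop⟩ := line_master line (hcnt line hl)
      have hright : (PySem.Str.slice line (some (PySem.Str.find line " | " + 3)) none).toList
          = pvSnd line := by
        rw [PySem.Str.toList_slice, PySem.Chars.slice_eq_listSlice]
        rw [PySem.Str.find_eq, hsep]
        have hfn : 0 ≤ PySem.Chars.find line.toList pvSep + 3 := by
          have := PySem.Chars.neg_one_le_find line.toList pvSep
          omega
        rw [PySem.List.slice_from line.toList hfn]
        exact hdrop
      simp only [hright]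
      have := scan_counts (pvSnd line) [] count
      simp only [List.length_nil, Nat.cast_zero] at this
      rw [this]
      rfl)]
  rw [PySem.List.foldl_add]
  simp [List.map_map, Function.comp_def]
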